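-- pv_equiv track=rewrite | github.com/SmilingWayne/pydoku | Utils.py | get_possible_candidates
-- ===== SOURCE A (Python) =====
-- def get_possible_candidates(size_, value_):
--     """ 一个大小为size_的cage 和为value_
--         返回所有的情况
--         仅支持九宫格数独
--     Args:
--         size_ (_int_): size of the cage
--         value_ (_int_): sum of the cage
--
--     Returns:
--         _type_: [[idxs of number],[]]
--     """
--     ref = [i for i in range(1,10)]
--     res = []
--     def backTrace(idx, path, size_, value_):
--         if len(path) == size_ and value_ == 0:
--             res.append(path[:])
--             return
--         if value_ < 0 or len(path) > size_:
--             return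
--         for i in range(idx,len(ref)):
--             path.append(ref[i])
--             backTrace(i + 1, path, size_, value_ - ref[i]) # i + 1
--             path.pop()
--
--     backTrace(0, [], size_ , value_)
--     return res
-- ===== SOURCE B (Python) =====
-- def get_possible_candidates(size_, value_):
--     """Generate-and-filter: enumerate all size_-subsets of 1..9 in lexicographic
--     order, keep those summing to value_ (same output/order as the backtracker)."""
--     if size_ < 0:
--         return []
--
--     def comb(n, digits):
--         if n == 0:
--             return [[]]
--         if not digits:
--             return []
--         first, rest = digits[0], digits[1:]
--         return [[first] + c for c in comb(n - 1, rest)] + comb(n, rest)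
--
--     return [c for c in comb(size_, list(range(1, 10))) if sum(c) == value_]
-- ===== Notes on version B (the rewrite author's own statement) =====
-- stated objective: alternative
-- what changed: Replaces the mutable-path pruned backtracking (value<0 / length cut-offs, append/pop on a shared list, nested closure appending to res) with a flat generate-and-filter: a pure recursive combinations function enumerates all size_-subsets of 1..9 in lexicographic order and a comprehension keeps those whose sum equals value_.
import Mathlib
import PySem

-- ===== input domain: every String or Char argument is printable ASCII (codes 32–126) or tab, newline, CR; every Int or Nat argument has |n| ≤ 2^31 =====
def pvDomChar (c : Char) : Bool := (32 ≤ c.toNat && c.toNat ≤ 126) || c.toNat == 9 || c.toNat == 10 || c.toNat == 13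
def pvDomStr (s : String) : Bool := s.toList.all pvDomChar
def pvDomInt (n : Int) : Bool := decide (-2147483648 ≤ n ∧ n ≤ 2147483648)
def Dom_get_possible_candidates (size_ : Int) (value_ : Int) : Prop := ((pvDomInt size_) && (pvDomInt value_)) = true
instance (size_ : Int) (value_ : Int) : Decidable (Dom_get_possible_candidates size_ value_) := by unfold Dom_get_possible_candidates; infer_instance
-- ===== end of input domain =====

-- B replaces A's pruned backtracking over a mutable path by a pure generate-and-filter
-- over all size_-combinations of 1..9 (objective: alternative, same output and order).

-- ===== PORT A =====
-- backTrace's for-loop over i in range(idx, len(ref)) is ported as structural recursion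
-- over the suffix of ref from idx; backTrace's two entry tests are inlined at each call
-- site (top level and recursive call), which makes the recursion structural.
def btLoopA (digits : List Int) (path : List Int) (size_ value_ : Int) : List (List Int) :=
  match digits with
  | [] => []
  | d :: rest =>
    (if ((path ++ [d]).length : Int) = size_ ∧ value_ - d = 0 then [path ++ [d]]
     else if value_ - d < 0 ∨ ((path ++ [d]).length : Int) > size_ then []
     else btLoopA rest (path ++ [d]) size_ (value_ - d))
    ++ btLoopA rest path size_ value_

def get_possible_candidates (size_ : Int) (value_ : Int) : List (List Int) :=
  let ref : List Int := PySem.List.pyRange 1 10 1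
  -- backTrace(0, [], size_, value_): entry tests with path = []
  if (([] : List Int).length : Int) = size_ ∧ value_ = 0 then [([] : List Int)]
  else if value_ < 0 ∨ (([] : List Int).length : Int) > size_ then []
  else btLoopA ref [] size_ value_

-- ===== PORT B =====
def comb (n : Int) (digits : List Int) : List (List Int) :=
  if n = 0 then [[]]
  else match digits with
  | [] => []
  | first :: rest => (comb (n - 1) rest).map (fun c => first :: c) ++ comb n rest

def get_possible_candidates_alt (size_ : Int) (value_ : Int) : List (List Int) :=
  if size_ < 0 then []
  else (comb size_ (PySem.List.pyRange 1 10 1)).filter (fun c => c.sum = value_)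

-- ===== PRECONDITION & SPEC =====
def Spec_get_possible_candidates (size_ : Int) (value_ : Int) (out : List (List Int)) : Prop := out = get_possible_candidates_alt size_ value_
instance (size_ : Int) (value_ : Int) (out : List (List Int)) : Decidable (Spec_get_possible_candidates size_ value_ out) := by unfold Spec_get_possible_candidates; infer_instance

-- ===== CLAIM (what is proved, stated in full; the proofs are below) =====
def Claim_equal_get_possible_candidates : Prop := ∀ (size_ : Int) (value_ : Int), Dom_get_possible_candidates size_ value_ → Spec_get_possible_candidates size_ value_ (get_possible_candidates size_ value_)

-- ===== LEMMAS AND PROOFS =====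

-- every member of a combination comes from the digit pool
lemma comb_mem_subset : ∀ (digits : List Int) (n : Int) (c : List Int),
    c ∈ comb n digits → ∀ x ∈ c, x ∈ digits := by
  intro digits
  induction digits with
  | nil =>
    intro n c hc x hx
    unfold comb at hc
    split at hc
    · simp at hc; subst hc; simp at hx
    · simp at hc
  | cons d rest ih =>
    intro n c hc x hx
    unfold comb at hc
    split at hc
    · simp at hc; subst hc; simp at hx
    · rcases List.mem_append.1 hc with h | h
      · obtain ⟨c', hc', rfl⟩ := List.mem_map.1 h
        rcases List.mem_cons.1 hx with rfl | hx'
        · exact List.mem_cons_self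
        · exact List.mem_cons_of_mem _ (ih _ _ hc' x hx')
      · exact List.mem_cons_of_mem _ (ih _ _ h x hx)

lemma comb_sum_nonneg {digits : List Int} (hd : ∀ x ∈ digits, 0 ≤ x)
    {n : Int} {c : List Int} (hc : c ∈ comb n digits) : 0 ≤ c.sum :=
  List.sum_nonneg (fun x hx => hd x (comb_mem_subset digits n c hc x hx))

lemma filter_comb_neg {digits : List Int} (hd : ∀ x ∈ digits, 0 ≤ x)
    {n value : Int} (hv : value < 0) :
    (comb n digits).filter (fun c => c.sum = value) = [] := by
  rw [List.filter_eq_nil_iff]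
  intro c hc
  simp only [decide_eq_true_eq]
  intro h
  exact absurd (h ▸ comb_sum_nonneg hd hc) (not_le.2 hv)

-- the loop of A equals a filtered combination enumeration over the remaining digits
lemma key : ∀ (digits path : List Int) (size_ value_ : Int),
    (∀ x ∈ digits, 0 ≤ x) → 0 ≤ value_ → (path.length : Int) ≤ size_ →
    ¬((path.length : Int) = size_ ∧ value_ = 0) →
    btLoopA digits path size_ value_ =
      ((comb (size_ - path.length) digits).filter (fun c => c.sum = value_)).map
        (fun c => path ++ c) := by
  intro digits
  induction digits with
  | nil =>
    intro path size_ value_ _ _ hle hne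
    unfold btLoopA comb
    split
    · rename_i h0
      have hps : (path.length : Int) = size_ := by omega
      have hv : value_ ≠ 0 := fun hv => hne ⟨hps, hv⟩
      simp [Ne.symm hv]
    · simp
  | cons d rest ih =>
    intro path size_ value_ hd hv hle hne
    have hd' : ∀ x ∈ rest, 0 ≤ x := fun x hx => hd x (List.mem_cons_of_mem _ hx)
    have hd0 : 0 ≤ d := hd d List.mem_cons_self
    by_cases hk : (path.length : Int) = size_
    · -- no room left: everything is empty
      have hv0 : value_ ≠ 0 := fun h => hne ⟨hk, h⟩
      have hsz : size_ - (path.length : Int) = 0 := by omega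
      unfold btLoopA
      rw [ih path size_ value_ hd' hv hle hne]
      have h1 : ¬(((path ++ [d]).length : Int) = size_ ∧ value_ - d = 0) := by
        simp only [List.length_append, List.length_cons, List.length_nil]
        omega
      have h2 : value_ - d < 0 ∨ ((path ++ [d]).length : Int) > size_ := by
        simp only [List.length_append, List.length_cons, List.length_nil]
        omega
      rw [if_neg h1, if_pos h2]
      rw [hsz]
      unfold comb
      simp [Ne.symm hv0]
    · -- path.length < size_: unfold comb on the cons
      have hlt : (path.length : Int) < size_ := lt_of_le_of_ne hle hk
      have hsz : size_ - (path.length : Int) ≠ 0 := by omega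
      unfold btLoopA
      conv_rhs => rw [comb]
      rw [if_neg hsz]
      rw [List.filter_append, List.map_append]
      -- second summand = tail of the loop, by ih with the same path
      rw [ih path size_ value_ hd' hv hle hne]
      congr 1
      -- first summand
      rw [List.filter_map]
      have hfc : ((fun c => decide (List.sum c = value_)) ∘ (fun c => d :: c))
          = fun c => decide (List.sum c = value_ - d) := by
        funext c
        simp only [Function.comp, List.sum_cons, decide_eq_decide]
        omega
      rw [hfc, List.map_map]
      have hmc : ((fun c => path ++ c) ∘ (fun c => d :: c))
          = fun c => (path ++ [d]) ++ c := by
        funext c; simp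
      rw [hmc]
      have harg : size_ - (path.length : Int) - 1 = size_ - ((path ++ [d]).length : Int) := by
        simp only [List.length_append, List.length_cons, List.length_nil]
        push_cast
        omega
      rw [harg]
      by_cases hA : ((path ++ [d]).length : Int) = size_ ∧ value_ - d = 0
      · -- child hits the success base case
        rw [if_pos hA]
        obtain ⟨hA1, hA2⟩ := hA
        rw [hA1, sub_self]
        unfold comb
        simp [hA2.symm]
      · rw [if_neg hA]
        have hlen' : ((path ++ [d]).length : Int) = (path.length : Int) + 1 := by
          simp only [List.length_append, List.length_cons, List.length_nil]; push_cast; omega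
        by_cases hB : value_ - d < 0 ∨ ((path ++ [d]).length : Int) > size_
        · rw [if_pos hB]
          have hneg : value_ - d < 0 := by omega
          rw [filter_comb_neg hd' hneg]
          simp
        · rw [if_neg hB]
          push Not at hB
          exact ih (path ++ [d]) size_ (value_ - d) hd' (by omega) hB.2 hA

lemma ref_nonneg : ∀ x ∈ PySem.List.pyRange 1 10 1, (0 : Int) ≤ x := by
  intro x hx
  rw [PySem.List.mem_pyRange_one] at hx
  omega

-- ===== VERDICT (by name: the statement is the Claim_ definition above) =====
theorem get_possible_candidates_spec : Claim_equal_get_possible_candidates := by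
  intro size_ value_ _
  unfold Spec_get_possible_candidates get_possible_candidates get_possible_candidates_alt
  simp only [List.length_nil, Nat.cast_zero]
  by_cases h1 : (0 : Int) = size_ ∧ value_ = 0
  · obtain ⟨hs, hv⟩ := h1
    rw [if_pos ⟨hs, hv⟩, if_neg (by omega), ← hs, hv]
    unfold comb
    simp
  · rw [if_neg h1]
    by_cases h2 : value_ < 0 ∨ (0 : Int) > size_
    · rw [if_pos h2]
      rcases h2 with hv | hs
      · by_cases hs' : size_ < 0
        · rw [if_pos hs']
        · rw [if_neg hs', filter_comb_neg ref_nonneg hv]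
      · rw [if_pos (by omega)]
    · rw [if_neg h2]
      push Not at h2
      rw [if_neg (by omega)]
      rw [key (PySem.List.pyRange 1 10 1) [] size_ value_ ref_nonneg h2.1 (by simp; omega)
        (by simpa using h1)]
      simp
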